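-- pv_equiv track=rewrite | github.com/befeleme/aoc | 2021/13/13b.py | create_data_matrix
-- ===== SOURCE A (Python) =====
-- from collections import defaultdict
--
-- def create_data_matrix(data):
--     max_x = 0
--     max_y = 0
--     m = defaultdict(lambda: ".")
--     for coor in data:
--         if coor == [""]:
--             break
--         else:
--             x, y = coor
--             x, y = int(x), int(y)
--             m[(x, y)] = "█"
--             if x > max_x:
--                 max_x = x
--             if y > max_y:
--                 max_y = y
--     return m, max_x, max_y
-- ===== SOURCE B (Python) =====
-- from collections import defaultdict
--
--
-- def create_data_matrix(data):
--     cut = data.index([""]) if [""] in data else len(data)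
--     pairs = [(int(x), int(y)) for x, y in data[:cut]]
--     m = defaultdict(lambda: ".")
--     for p in pairs:
--         m[p] = "█"
--     max_x = max([0] + [x for x, y in pairs])
--     max_y = max([0] + [y for x, y in pairs])
--     return m, max_x, max_y
-- ===== Notes on version B (the rewrite author's own statement) =====
-- stated objective: alternative
-- what changed: A interleaves break-detection, parsing, dict insertion and running-max updates in one accumulator loop; B first cuts the prefix before the [""] sentinel via index/slicing, materialises a list of parsed (x, y) pairs, then builds the dict and computes each maximum in separate passes over that list.
import Mathlib
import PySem

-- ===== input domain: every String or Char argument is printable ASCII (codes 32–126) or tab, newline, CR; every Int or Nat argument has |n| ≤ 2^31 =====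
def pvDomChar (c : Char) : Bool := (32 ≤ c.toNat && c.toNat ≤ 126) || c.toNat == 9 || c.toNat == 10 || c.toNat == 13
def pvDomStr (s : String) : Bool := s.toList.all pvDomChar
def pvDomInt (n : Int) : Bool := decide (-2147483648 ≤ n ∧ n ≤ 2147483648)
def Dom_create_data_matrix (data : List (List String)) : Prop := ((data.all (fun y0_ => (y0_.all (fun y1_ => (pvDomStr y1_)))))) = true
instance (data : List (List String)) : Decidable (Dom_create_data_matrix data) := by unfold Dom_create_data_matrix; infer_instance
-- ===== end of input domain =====

-- B reorganises A's single accumulator loop into cut-prefix / parse-pairs / build-dict / two max reductions; same return value wherever A returns.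

-- ===== PORT A =====
-- A's loop with break: recursion over data carrying (m, max_x, max_y).
-- 'x, y = coor; int(x), int(y)' raises outside Pre_; there the port uses getD 0 (totality guard only).
def goA_create_data_matrix : List (List String) → PySem.Dict (Int × Int) String → Int → Int →
    PySem.Dict (Int × Int) String × Int × Int
  | [], m, mx, my => (m, mx, my)
  | coor :: rest, m, mx, my =>
    if coor = [""] then (m, mx, my)
    else
      let x := (PySem.Int.ofStr? (coor.headD "")).getD 0
      let y := (PySem.Int.ofStr? ((coor.drop 1).headD "")).getD 0
      goA_create_data_matrix rest (m.insert (x, y) "█")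
        (if x > mx then x else mx) (if y > my then y else my)

def create_data_matrix (data : List (List String)) : (List (Int × Int × String)) × Int × Int :=
  let r := goA_create_data_matrix data PySem.Dict.empty 0 0
  (r.1.items.map (fun p => (p.1.1, p.1.2, p.2)), r.2.1, r.2.2)

-- ===== PORT B =====
def create_data_matrix_alt (data : List (List String)) : (List (Int × Int × String)) × Int × Int :=
  let cut : Nat := if [""] ∈ data then (PySem.List.index? data [""]).getD 0 else data.length
  let rows := PySem.List.slice data none (some (cut : Int))
  let pairs : List (Int × Int) := rows.map (fun c =>
    ((PySem.Int.ofStr? (c.headD "")).getD 0, (PySem.Int.ofStr? ((c.drop 1).headD "")).getD 0))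
  let m := pairs.foldl (fun d p => d.insert p "█") PySem.Dict.empty
  let max_x := (PySem.List.max? ((0 : Int) :: pairs.map (·.1)) (fun v => v)).getD 0
  let max_y := (PySem.List.max? ((0 : Int) :: pairs.map (·.2)) (fun v => v)).getD 0
  (m.items.map (fun p => (p.1.1, p.1.2, p.2)), max_x, max_y)

-- ===== PRECONDITION & SPEC =====
-- Pre_ excludes exactly the inputs on which Python A raises: a row before the first [""] sentinel
-- that does not have exactly two elements (ValueError on unpacking) or whose elements are not
-- int()-parseable (ValueError from int()); every input on which A returns satisfies Pre_.
def Pre_create_data_matrix (data : List (List String)) : Prop :=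
  ∀ c ∈ data.takeWhile (fun c => !(c == [""])),
    c.length = 2 ∧ (PySem.Int.ofStr? (c.headD "")).isSome ∧
      (PySem.Int.ofStr? ((c.drop 1).headD "")).isSome
instance (data : List (List String)) : Decidable (Pre_create_data_matrix data) := by
  unfold Pre_create_data_matrix; infer_instance

def pvWitness_create_data_matrix : List (List String) :=
  [[""], ["x"]]

def Spec_create_data_matrix (data : List (List String)) (out : (List (Int × Int × String)) × Int × Int) : Prop := out = create_data_matrix_alt data
instance (data : List (List String)) (out : (List (Int × Int × String)) × Int × Int) : Decidable (Spec_create_data_matrix data out) := by unfold Spec_create_data_matrix; infer_instance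

-- ===== CLAIM (what is proved, stated in full; the proofs are below) =====
def Claim_equal_create_data_matrix : Prop := ∀ (data : List (List String)), Dom_create_data_matrix data → Pre_create_data_matrix data → Spec_create_data_matrix data (create_data_matrix data)

-- ===== LEMMAS AND PROOFS =====

-- A's loop stops at the first [""]: running it on data is running it on the takeWhile prefix.
theorem goA_takeWhile (data : List (List String)) (m : PySem.Dict (Int × Int) String)
    (mx my : Int) :
    goA_create_data_matrix data m mx my =
      goA_create_data_matrix (data.takeWhile (fun c => !(c == [""]))) m mx my := by
  induction data generalizing m mx my with
  | nil => rfl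
  | cons c t ih =>
    by_cases h : c = [""]
    · simp [goA_create_data_matrix, h]
    · simp [goA_create_data_matrix, h, ih]

-- B's slice at the index of the first [""] is the same takeWhile prefix.
theorem take_cut_eq_takeWhile (data : List (List String)) :
    data.take (if [""] ∈ data then (PySem.List.index? data [""]).getD 0 else data.length) =
      data.takeWhile (fun c => !(c == [""])) := by
  induction data with
  | nil => simp
  | cons c t ih =>
    by_cases h : c = [""]
    · subst h
      rw [PySem.List.index?_cons_self]
      simp
    · have hne : [""] ∈ c :: t ↔ [""] ∈ t := by simp [eq_comm, h]
      by_cases hm : [""] ∈ t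
      · rw [if_pos (hne.mpr hm), PySem.List.index?_cons_of_ne t h]
        have : (PySem.List.index? t [""]).isSome := by
          rw [PySem.List.index?_isSome_iff]; exact hm
        obtain ⟨k, hk⟩ := Option.isSome_iff_exists.mp this
        rw [hk]
        rw [if_pos hm, hk] at ih
        simp [h, ← ih]
      · rw [if_neg (fun hx => hm (hne.mp hx))]
        rw [if_neg hm] at ih
        simp [h, ← ih]

-- On a break-free row list, A's interleaved loop equals B's parse-then-fold decomposition.
theorem goA_eq_folds (rows : List (List String)) (h : ∀ c ∈ rows, ¬ c = [""])
    (m : PySem.Dict (Int × Int) String) (mx my : Int) :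
    goA_create_data_matrix rows m mx my =
      (((rows.map (fun c =>
          ((PySem.Int.ofStr? (c.headD "")).getD 0,
           (PySem.Int.ofStr? ((c.drop 1).headD "")).getD 0))).foldl
            (fun d p => d.insert p "█") m),
       ((rows.map (fun c =>
          ((PySem.Int.ofStr? (c.headD "")).getD 0,
           (PySem.Int.ofStr? ((c.drop 1).headD "")).getD 0))).foldl
            (fun a p => if p.1 > a then p.1 else a) mx),
       ((rows.map (fun c =>
          ((PySem.Int.ofStr? (c.headD "")).getD 0,
           (PySem.Int.ofStr? ((c.drop 1).headD "")).getD 0))).foldl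
            (fun a p => if p.2 > a then p.2 else a) my)) := by
  induction rows generalizing m mx my with
  | nil => rfl
  | cons c t ih =>
    have hc : ¬ c = [""] := h c (by simp)
    simp only [goA_create_data_matrix, if_neg hc, List.map_cons, List.foldl_cons]
    exact ih (fun d hd => h d (by simp [hd])) _ _ _

-- A's running 'if x > a then x else a' over a pair list is B's max over 0-prefixed projections.
theorem max_fold_eq (l : List Int) (a : Int) :
    (PySem.List.max? (a :: l) (fun v => v)).getD a = l.foldl (fun b x => if x > b then x else b) a := by
  rw [PySem.List.max?_id_cons]
  simp only [Option.getD_some]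
  congr 1
  funext b x
  rw [max_def]
  split_ifs <;> omega

-- ===== VERDICT (by name: the statement is the Claim_ definition above) =====
theorem create_data_matrix_spec : Claim_equal_create_data_matrix := by
  intro data _ _
  unfold Spec_create_data_matrix create_data_matrix create_data_matrix_alt
  dsimp only
  rw [PySem.List.slice_to_natCast, take_cut_eq_takeWhile, goA_takeWhile]
  have hrows : ∀ c ∈ data.takeWhile (fun c => !(c == [""])), ¬ c = [""] := by
    intro c hc
    have := List.mem_takeWhile_imp hc
    simpa using this
  rw [goA_eq_folds _ hrows]
  simp only [max_fold_eq, List.foldl_map]
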